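-- pv_equiv track=rewrite | github.com/mdsung/bioinformatics_workshop | bioinfomatics1/frequencymap.py | create_frequency_map
-- ===== SOURCE A (Python) =====
-- def create_frequency_map(text, k):
--     freqmap = {}
--     maximum_value = 0
--
--     for i in range(0, len(text) - k):
--         pattern = text[i:i+k]
--         if freqmap.get(pattern):
--             freqmap[pattern] += 1
--             if freqmap[pattern] > maximum_value:
--                 maximum_value = freqmap[pattern]
--         elif freqmap.get(pattern) == None:
--             freqmap[pattern] = 1
--
--     return freqmap, maximum_value
-- ===== SOURCE B (Python) =====
-- def create_frequency_map(text, k):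
--     patterns = [text[i:i+k] for i in range(0, len(text) - k)]
--     freqmap = {}
--     for p in patterns:
--         if p not in freqmap:
--             freqmap[p] = patterns.count(p)
--     maximum_value = max((v for v in freqmap.values() if v > 1), default=0)
--     return freqmap, maximum_value
-- ===== Notes on version B (the rewrite author's own statement) =====
-- stated objective: alternative
-- what changed: A counts incrementally in one interleaved loop, bumping a dict entry and tracking the maximum inline with truthiness branches; B materialises the k-mer list once, fills the dict by computing each distinct pattern's total via list.count on first sight (membership-guarded, no incremental updates), and obtains the maximum with a builtin max over the values filtered to counts > 1 (preserving A's rule that unrepeated patterns leave the maximum at 0).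
import Mathlib
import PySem

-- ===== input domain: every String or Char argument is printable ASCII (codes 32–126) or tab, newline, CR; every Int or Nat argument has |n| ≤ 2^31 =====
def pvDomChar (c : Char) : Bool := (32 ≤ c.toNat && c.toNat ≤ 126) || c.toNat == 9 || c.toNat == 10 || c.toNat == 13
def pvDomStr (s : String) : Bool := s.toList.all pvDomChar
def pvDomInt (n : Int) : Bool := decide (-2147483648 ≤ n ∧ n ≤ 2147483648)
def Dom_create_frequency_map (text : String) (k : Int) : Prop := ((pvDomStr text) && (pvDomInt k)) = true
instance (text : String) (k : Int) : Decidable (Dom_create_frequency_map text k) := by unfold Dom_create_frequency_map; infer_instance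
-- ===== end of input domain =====

-- B replaces A's interleaved incremental counting with per-distinct-pattern totals via list.count
-- over a materialised k-mer list, and a separate builtin max over the filtered dict values.

-- ===== PORT A =====
-- (the Python's 'pattern = text[i:i+k]' is written inline; it is the same pure slice)
def create_frequency_map (text : String) (k : Int) : (List (String × Int)) × Int :=
  let st := (PySem.List.pyRange 0 (PySem.Str.len text - k) 1).foldl
    (fun (st : PySem.Dict String Int × Int) i =>
      match st.1.get? (PySem.Str.slice text (some i) (some (i + k))) with
      | some c =>
          if c ≠ 0 then                                -- 'if freqmap.get(pattern):' (truthy int)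
            (st.1.insert (PySem.Str.slice text (some i) (some (i + k))) (c + 1),
             if c + 1 > st.2 then c + 1 else st.2)
          else st                                       -- get returned 0: neither branch fires
      | none =>                                         -- 'elif freqmap.get(pattern) == None:'
          (st.1.insert (PySem.Str.slice text (some i) (some (i + k))) 1, st.2))
    (PySem.Dict.empty, 0)
  (st.1.items, st.2)

-- ===== PORT B =====
def create_frequency_map_alt (text : String) (k : Int) : (List (String × Int)) × Int :=
  let patterns := (PySem.List.pyRange 0 (PySem.Str.len text - k) 1).map
    (fun i => PySem.Str.slice text (some i) (some (i + k)))
  let freqmap := patterns.foldl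
    (fun (d : PySem.Dict String Int) p =>
      if d.contains p then d else d.insert p (patterns.count p : Int))
    PySem.Dict.empty
  let maximum_value :=
    match PySem.List.max? (freqmap.values.filter (fun v => v > 1)) (fun v => v) with
    | some m => m
    | none => 0
  (freqmap.items, maximum_value)

-- ===== PRECONDITION & SPEC =====
def Spec_create_frequency_map (text : String) (k : Int) (out : (List (String × Int)) × Int) : Prop := out = create_frequency_map_alt text k
instance (text : String) (k : Int) (out : (List (String × Int)) × Int) : Decidable (Spec_create_frequency_map text k out) := by unfold Spec_create_frequency_map; infer_instance

-- ===== CLAIM (what is proved, stated in full; the proofs are below) =====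
def Claim_equal_create_frequency_map : Prop := ∀ (text : String) (k : Int), Dom_create_frequency_map text k → Spec_create_frequency_map text k (create_frequency_map text k)

-- ===== LEMMAS AND PROOFS =====

-- A's max-update step and the value scan it induces on a dict
def pvG (m count : Int) : Int := if count > 1 ∧ count > m then count else m

def pvSmax (d : PySem.Dict String Int) : Int := d.values.foldl pvG 0

theorem pvG_nonneg (l : List Int) (b : Int) (hb : 0 ≤ b) : 0 ≤ l.foldl pvG b := by
  induction l generalizing b with
  | nil => exact hb
  | cons v t ih =>
      refine ih _ ?_
      simp only [pvG]; split_ifs with h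
      · omega
      · exact hb

theorem pvG_split (l : List Int) (b : Int) (hb : 0 ≤ b) :
    l.foldl pvG b = max b (l.foldl pvG 0) := by
  induction l generalizing b with
  | nil => simp only [List.foldl_nil]; omega
  | cons v t ih =>
      simp only [List.foldl_cons]
      rw [ih (pvG b v) (by simp only [pvG]; split_ifs <;> omega),
          ih (pvG 0 v) (by simp only [pvG]; split_ifs <;> omega)]
      have h0 : 0 ≤ t.foldl pvG 0 := pvG_nonneg t 0 le_rfl
      simp only [pvG]; split_ifs <;> omega

-- replacing one value c (c ≥ 1) by c+1 in the scanned list raises the scan to max(old, c+1)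
theorem pvG_replace (l1 l2 : List Int) (c : Int) (hc : 1 ≤ c) :
    (l1 ++ (c + 1) :: l2).foldl pvG 0 = max ((l1 ++ c :: l2).foldl pvG 0) (c + 1) := by
  have hA : 0 ≤ l1.foldl pvG 0 := pvG_nonneg l1 0 le_rfl
  have hF : 0 ≤ l2.foldl pvG 0 := pvG_nonneg l2 0 le_rfl
  rw [List.foldl_append, List.foldl_append]
  simp only [List.foldl_cons]
  rw [pvG_split l2 (pvG (l1.foldl pvG 0) (c + 1)) (by simp only [pvG]; split_ifs <;> omega),
      pvG_split l2 (pvG (l1.foldl pvG 0) c) (by simp only [pvG]; split_ifs <;> omega)]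
  simp only [pvG]; split_ifs <;> omega

-- appending a value 1 leaves the scan unchanged
theorem pvG_append_one (l : List Int) : (l ++ [1]).foldl pvG 0 = l.foldl pvG 0 := by
  rw [List.foldl_append]
  simp [pvG]

-- one step of A's loop, starting from an invariant state
theorem pv_step (d : PySem.Dict String Int) (m : Int) (p : String)
    (hnd : d.keys.Nodup) (hv : ∀ v ∈ d.values, 1 ≤ v) (hm : m = pvSmax d) :
    (match d.get? p with
     | some c => if c ≠ 0 then (d.insert p (c + 1), if c + 1 > m then c + 1 else m) else (d, m)
     | none => (d.insert p 1, m))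
    = (d.insert p (d.getD p 0 + 1), pvSmax (d.insert p (d.getD p 0 + 1)))
    ∧ (d.insert p (d.getD p 0 + 1)).keys.Nodup
    ∧ (∀ v ∈ (d.insert p (d.getD p 0 + 1)).values, 1 ≤ v) := by
  cases hg : d.get? p with
  | none =>
      have hgd : d.getD p 0 = 0 := PySem.Dict.getD_of_get?_eq_none d 0 hg
      have hcon : d.contains p = false := by
        rw [PySem.Dict.contains_eq_isSome_get?, hg]; rfl
      rw [hgd]
      have hvals : (d.insert p (0 + 1)).values = d.values ++ [1] := by
        simp only [PySem.Dict.values, PySem.Dict.items_insert_of_not_contains d _ hcon,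
          List.map_append, List.map_cons, List.map_nil, zero_add]
      refine ⟨?_, PySem.Dict.nodup_keys_insert d p (0 + 1) hnd, ?_⟩
      · have hsm : pvSmax (d.insert p (0 + 1)) = pvSmax d := by
          simp only [pvSmax, hvals]; exact pvG_append_one _
        rw [hsm, ← hm]
        norm_num
      · intro v hvmem
        rw [hvals] at hvmem
        rcases List.mem_append.mp hvmem with h | h
        · exact hv v h
        · simp at h; omega
  | some c =>
      have hgd : d.getD p 0 = c := PySem.Dict.getD_of_get?_eq_some d 0 hg
      have hmem : (p, c) ∈ d.items := PySem.Dict.mem_items_of_get?_eq_some d hg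
      have hc1 : 1 ≤ c := hv c (by
        simp only [PySem.Dict.values]; exact List.mem_map.mpr ⟨(p, c), hmem, rfl⟩)
      have hcne : c ≠ 0 := by omega
      rw [hgd]
      -- decompose the key list at p
      have hpk : p ∈ d.keys := PySem.Dict.mem_keys_of_mem_items d hmem
      obtain ⟨k1, k2, hks⟩ := List.append_of_mem hpk
      have hno : p ∉ k1 ∧ p ∉ k2 := by
        have h := hks ▸ hnd
        simp [List.nodup_append] at h
        exact ⟨fun hp => (h.2.2 p hp).1 rfl, h.2.1.1⟩
      have hvd : d.values = k1.map (fun x => d.getD x 0) ++ (c :: k2.map (fun x => d.getD x 0)) := by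
        rw [PySem.Dict.values_eq_map_keys d hnd 0, hks]
        simp [hgd]
      have hcon : d.contains p = true := by
        rw [PySem.Dict.contains_eq_isSome_get?, hg]; rfl
      have hvd' : (d.insert p (c + 1)).values
          = k1.map (fun x => d.getD x 0) ++ ((c + 1) :: k2.map (fun x => d.getD x 0)) := by
        rw [PySem.Dict.values_eq_map_keys _ (PySem.Dict.nodup_keys_insert d p (c + 1) hnd) 0,
            PySem.Dict.keys_insert_of_contains d _ hcon, hks]
        simp only [List.map_append, List.map_cons]
        congr 1
        · exact List.map_congr_left (fun x hx => by
            rw [PySem.Dict.getD_insert]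
            have hxp : x ≠ p := fun h => hno.1 (h ▸ hx)
            simp [hxp])
        · congr 1
          · simp
          · exact List.map_congr_left (fun x hx => by
              rw [PySem.Dict.getD_insert]
              have hxp : x ≠ p := fun h => hno.2 (h ▸ hx)
              simp [hxp])
      have hsm : pvSmax (d.insert p (c + 1)) = max (pvSmax d) (c + 1) := by
        simp only [pvSmax, hvd, hvd']
        exact pvG_replace _ _ c hc1
      refine ⟨?_, PySem.Dict.nodup_keys_insert d p (c + 1) hnd, ?_⟩
      · simp only [ne_eq, hcne, not_false_eq_true, if_true]
        refine Prod.ext rfl ?_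
        rw [hsm, hm]
        simp only []
        omega
      · intro v hvmem
        rcases PySem.Dict.mem_values_insert d p (c + 1) v hvmem with h | h
        · omega
        · exact hv v h

-- A's whole loop equals the plain counting fold paired with the value scan of its result
theorem pv_main (L : List Int) (f : Int → String) :
    ∀ (d : PySem.Dict String Int) (m : Int),
    d.keys.Nodup → (∀ v ∈ d.values, 1 ≤ v) → m = pvSmax d →
    (L.foldl (fun (st : PySem.Dict String Int × Int) i =>
        match st.1.get? (f i) with
        | some c => if c ≠ 0 then (st.1.insert (f i) (c + 1), if c + 1 > st.2 then c + 1 else st.2) else st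
        | none => (st.1.insert (f i) 1, st.2)) (d, m))
    = (L.foldl (fun d i => d.insert (f i) (d.getD (f i) 0 + 1)) d,
       pvSmax (L.foldl (fun d i => d.insert (f i) (d.getD (f i) 0 + 1)) d)) := by
  induction L with
  | nil => intro d m _ _ hm; simpa using hm
  | cons i t ih =>
      intro d m hnd hv hm
      obtain ⟨heq, hnd', hv'⟩ := pv_step d m (f i) hnd hv hm
      simp only [List.foldl_cons]
      rw [heq]
      exact ih _ _ hnd' hv' rfl

-- B's guarded fold: lookup characterisation (c is the fixed count function it inserts)
theorem pvB_get? (c : String → Int) :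
    ∀ (S : List String) (d : PySem.Dict String Int) (x : String),
    (S.foldl (fun d p => if d.contains p then d else d.insert p (c p)) d).get? x
      = if d.contains x then d.get? x else if x ∈ S then some (c x) else none := by
  intro S
  induction S with
  | nil =>
      intro d x
      cases hg : d.get? x with
      | some v =>
          have hc : d.contains x = true := by rw [PySem.Dict.contains_eq_isSome_get?, hg]; rfl
          simp [hc, hg]
      | none =>
          have hc : d.contains x = false := by rw [PySem.Dict.contains_eq_isSome_get?, hg]; rfl
          simp [hc, hg]
  | cons p S' ih =>
      intro d x
      simp only [List.foldl_cons]
      by_cases hc : d.contains p = true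
      · rw [if_pos hc, ih d x]
        by_cases hx : d.contains x = true
        · simp [hx]
        · simp only [Bool.not_eq_true] at hx
          have hxp : x ≠ p := fun h => by rw [h] at hx; rw [hx] at hc; simp at hc
          simp [hx, List.mem_cons, hxp]
      · simp only [Bool.not_eq_true] at hc
        rw [if_neg (by simp [hc]), ih (d.insert p (c p)) x]
        by_cases hxp : x = p
        · subst hxp
          rw [if_pos (PySem.Dict.contains_insert_self d x (c x)),
              PySem.Dict.get?_insert_self, if_neg (by simp [hc]), if_pos (by simp)]
        · have h1 : (d.insert p (c p)).contains x = d.contains x := by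
            rw [PySem.Dict.contains_insert]
            simp [hxp]
          rw [h1, PySem.Dict.get?_insert_of_ne d (c p) hxp]
          by_cases hx : d.contains x = true
          · simp [hx]
          · simp only [Bool.not_eq_true] at hx
            simp [hx, List.mem_cons, hxp]

-- B's guarded fold: key order and uniqueness
theorem pvB_keys (c : String → Int) :
    ∀ (S : List String) (d : PySem.Dict String Int), d.keys.Nodup →
    (S.foldl (fun d p => if d.contains p then d else d.insert p (c p)) d).keys
        = PySem.Set.update d.keys S
      ∧ (S.foldl (fun d p => if d.contains p then d else d.insert p (c p)) d).keys.Nodup := by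
  intro S
  induction S with
  | nil => intro d hnd; exact ⟨rfl, hnd⟩
  | cons p S' ih =>
      intro d hnd
      simp only [List.foldl_cons, PySem.Set.update]
      by_cases hc : d.contains p = true
      · have hadd : PySem.Set.add d.keys p = d.keys :=
          PySem.Set.add_of_mem ((PySem.Dict.contains_iff_mem_keys d p).mp hc)
        rw [if_pos hc]
        obtain ⟨h1, h2⟩ := ih d hnd
        exact ⟨by rw [h1]; unfold PySem.Set.update; rw [hadd], h2⟩
      · simp only [Bool.not_eq_true] at hc
        rw [if_neg (by simp [hc])]
        obtain ⟨h1, h2⟩ := ih (d.insert p (c p)) (PySem.Dict.nodup_keys_insert d p (c p) hnd)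
        refine ⟨?_, h2⟩
        rw [h1, PySem.Dict.keys_insert_of_not_contains d (c p) hc]
        unfold PySem.Set.update
        congr 1
        refine (PySem.Set.add_of_not_mem ?_).symm
        intro hmem
        exact absurd ((PySem.Dict.contains_iff_mem_keys d p).mpr hmem) (by simp [hc])

-- B's dict equals Counter(patterns): same items list
theorem pvB_items (L : List String) :
    (L.foldl (fun d p => if d.contains p then d else d.insert p ((L.count p : Int))) PySem.Dict.empty).items
      = (PySem.Dict.counter L).items := by
  set F := L.foldl (fun d p => if d.contains p then d else d.insert p ((L.count p : Int)))
      PySem.Dict.empty with hF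
  obtain ⟨hk, hnd⟩ := pvB_keys (fun p => (L.count p : Int)) L PySem.Dict.empty
      (by simp [PySem.Dict.empty])
  have hkeys : F.keys = PySem.Set.ofList L := by
    rw [← hF] at hk
    rw [hk]
    have : (PySem.Dict.empty : PySem.Dict String Int).keys = ([] : List String) := by
      simp [PySem.Dict.empty, PySem.Dict.keys]
    rw [this, PySem.Set.update_nil_left]
  rw [PySem.Dict.items_eq_map_keys F hnd 0, PySem.Dict.items_counter, hkeys]
  refine List.map_congr_left (fun x hx => ?_)
  have hxL : x ∈ L := (PySem.Set.mem_ofList L x).mp hx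
  have hg := pvB_get? (fun p => (L.count p : Int)) L PySem.Dict.empty x
  rw [← hF] at hg
  rw [PySem.Dict.getD_eq_get?_getD, hg]
  simp [PySem.Dict.contains_empty, hxL]

-- B's filtered builtin max equals the pvG value scan
theorem pv_filter_max (l : List Int) :
    (match PySem.List.max? (l.filter (fun v => v > 1)) (fun v => v) with
     | some m => m
     | none => 0) = l.foldl pvG 0 := by
  have key : ∀ (b : Int), 0 ≤ b → l.foldl pvG b = (l.filter (fun v => v > 1)).foldl max b := by
    induction l with
    | nil => intro b _; rfl
    | cons v t ih =>
        intro b hb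
        simp only [List.foldl_cons, List.filter_cons]
        by_cases hv : v > 1
        · rw [if_pos (by simpa using hv)]
          simp only [List.foldl_cons]
          have : pvG b v = max b v := by simp only [pvG]; split_ifs <;> omega
          rw [this]
          exact ih (max b v) (by omega)
        · rw [if_neg (by simpa using hv)]
          have : pvG b v = b := by simp only [pvG]; split_ifs <;> omega
          rw [this]
          exact ih b hb
  rw [key 0 le_rfl]
  cases hf : l.filter (fun v => v > 1) with
  | nil => simp [PySem.List.max?]
  | cons x t =>
      have hx : x > 1 := by
        have := List.mem_filter.mp (hf ▸ List.mem_cons_self (l := t))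
        simpa using this.2
      rw [PySem.List.max?_id_cons]
      simp only [List.foldl_cons]
      have : max 0 x = x := by omega
      rw [this]

-- ===== VERDICT (by name: the statement is the Claim_ definition above) =====
theorem create_frequency_map_spec : Claim_equal_create_frequency_map := by
  intro text k _
  show create_frequency_map text k = create_frequency_map_alt text k
  unfold create_frequency_map create_frequency_map_alt
  rw [pv_main (PySem.List.pyRange 0 (PySem.Str.len text - k) 1)
      (fun i => PySem.Str.slice text (some i) (some (i + k)))
      PySem.Dict.empty 0 (by simp) (by simp [PySem.Dict.values, PySem.Dict.empty]) rfl]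
  simp only []
  have hfm : (PySem.List.pyRange 0 (PySem.Str.len text - k) 1).foldl
      (fun d i => PySem.Dict.insert d (PySem.Str.slice text (some i) (some (i + k)))
        (d.getD (PySem.Str.slice text (some i) (some (i + k))) 0 + 1)) PySem.Dict.empty
      = PySem.Dict.counter ((PySem.List.pyRange 0 (PySem.Str.len text - k) 1).map
          (fun i => PySem.Str.slice text (some i) (some (i + k)))) := by
    rw [← PySem.Dict.foldl_insert_getD_add_one_eq_counter, List.foldl_map]
  set L := (PySem.List.pyRange 0 (PySem.Str.len text - k) 1).map
      (fun i => PySem.Str.slice text (some i) (some (i + k))) with hL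
  have hitems := pvB_items L
  have hvalues : (L.foldl (fun d p => if d.contains p then d else d.insert p ((L.count p : Int)))
      PySem.Dict.empty).values = (PySem.Dict.counter L).values := by
    simp only [PySem.Dict.values, hitems]
  refine Prod.ext ?_ ?_
  · simp only [hfm, hitems]
  · simp only [hvalues, hfm]
    rw [pv_filter_max]
    rfl
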